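-- pv_equiv track=rewrite | github.com/amgayathri3/fampnn | restore_chain_ids_from_pose_bk.py | match_chains_by_sequence
-- ===== SOURCE A (Python) =====
-- def match_chains_by_sequence(original_seq_dict, designed_seq_dict):
--     used = set()
--     mapping = {}
--     for orig_chain, orig_seq in original_seq_dict.items():
--         for design_chain, design_seq in designed_seq_dict.items():
--             if design_chain in used:
--                 continue
--             if orig_seq[:10] == design_seq[:10]:  # simple heuristic match
--                 mapping[design_chain] = orig_chain
--                 used.add(design_chain)
--                 break
--     return mapping
-- ===== SOURCE B (Python) =====
-- def match_chains_by_sequence(original_seq_dict, designed_seq_dict):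
--     # Group designed chains by their 10-char sequence prefix once, then give each
--     # original chain the next unused designed chain of its prefix group.
--     groups = {}
--     for design_chain, design_seq in designed_seq_dict.items():
--         groups.setdefault(design_seq[:10], []).append(design_chain)
--     mapping = {}
--     for orig_chain, orig_seq in original_seq_dict.items():
--         g = groups.get(orig_seq[:10])
--         if g:
--             mapping[g.pop(0)] = orig_chain
--     return mapping
-- ===== Notes on version B (the rewrite author's own statement) =====
-- stated objective: faster
-- what changed: B replaces A's inner scan over designed_seq_dict per original chain (with a 'used' set) by a single pre-grouping of designed chains into a dict keyed by 10-char sequence prefix, then hands each original chain the next chain of its prefix group.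
import Mathlib
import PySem

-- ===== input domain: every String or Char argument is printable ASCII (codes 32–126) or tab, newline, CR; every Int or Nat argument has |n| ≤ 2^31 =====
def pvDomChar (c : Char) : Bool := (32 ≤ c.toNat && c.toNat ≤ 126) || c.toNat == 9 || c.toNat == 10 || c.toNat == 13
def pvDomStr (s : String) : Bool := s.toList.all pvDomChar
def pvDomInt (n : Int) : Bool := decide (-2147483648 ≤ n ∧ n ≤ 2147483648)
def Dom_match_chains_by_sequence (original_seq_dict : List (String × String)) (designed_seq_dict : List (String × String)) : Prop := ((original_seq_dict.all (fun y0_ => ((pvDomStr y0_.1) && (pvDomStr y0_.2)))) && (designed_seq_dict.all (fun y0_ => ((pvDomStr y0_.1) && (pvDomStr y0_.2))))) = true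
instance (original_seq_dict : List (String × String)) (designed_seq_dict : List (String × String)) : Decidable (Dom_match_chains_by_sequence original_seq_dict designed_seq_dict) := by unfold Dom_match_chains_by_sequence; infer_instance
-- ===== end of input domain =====

-- B groups the designed chains by 10-char sequence prefix once and hands each original chain
-- the next unused chain of its prefix group, removing A's inner scan over designed_seq_dict (objective: faster).

-- ===== PORT A =====
-- seq[:10]
def pvPrefix10 (s : String) : String := PySem.Str.slice s none (some 10)

-- the inner 'for design_chain, design_seq in designed_seq_dict.items(): …' loop of A
def pvFindMatch (used : PySem.Set String) (p : String) : List (String × String) → Option String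
  | [] => none
  | (dk, ds) :: rest =>
    if PySem.Set.contains used dk then pvFindMatch used p rest
    else if pvPrefix10 ds = p then some dk
    else pvFindMatch used p rest

def match_chains_by_sequence (original_seq_dict : List (String × String)) (designed_seq_dict : List (String × String)) : List (String × String) :=
  (original_seq_dict.foldl
    (fun (st : PySem.Set String × PySem.Dict String String) o =>
      match pvFindMatch st.1 (pvPrefix10 o.2) designed_seq_dict with
      | none => st
      | some dk => (PySem.Set.add st.1 dk, st.2.insert dk o.1))
    (PySem.Set.empty, PySem.Dict.empty)).2.items

-- ===== PORT B =====
def match_chains_by_sequence_alt (original_seq_dict : List (String × String)) (designed_seq_dict : List (String × String)) : List (String × String) :=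
  -- groups.setdefault(design_seq[:10], []).append(design_chain)
  let groups : PySem.Dict String (List String) :=
    designed_seq_dict.foldl (fun g kv => g.modify (pvPrefix10 kv.2) [] (· ++ [kv.1])) PySem.Dict.empty
  (original_seq_dict.foldl
    (fun (st : PySem.Dict String (List String) × PySem.Dict String String) o =>
      match st.1.getD (pvPrefix10 o.2) [] with
      | [] => st
      | dk :: rest => (st.1.insert (pvPrefix10 o.2) rest, st.2.insert dk o.1))
    (groups, PySem.Dict.empty)).2.items

-- ===== PRECONDITION & SPEC =====
-- The two assoc-list arguments stand for Python dicts, so their keys must be pairwise distinct;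
-- duplicate-key lists cannot arise from a dict and are excluded.
def Pre_match_chains_by_sequence (original_seq_dict : List (String × String)) (designed_seq_dict : List (String × String)) : Prop :=
  (original_seq_dict.map Prod.fst).Nodup ∧ (designed_seq_dict.map Prod.fst).Nodup
instance (original_seq_dict : List (String × String)) (designed_seq_dict : List (String × String)) : Decidable (Pre_match_chains_by_sequence original_seq_dict designed_seq_dict) := by unfold Pre_match_chains_by_sequence; infer_instance
def pvWitness_match_chains_by_sequence : (List (String × String)) × (List (String × String)) :=
  ([("A", "MKTAYIAKQRQISFVK"), ("B", "GSHMGSGSGS")], [("C", "GSHMGSGSGSXX"), ("D", "MKTAYIAKQRWWWW")])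

def Spec_match_chains_by_sequence (original_seq_dict : List (String × String)) (designed_seq_dict : List (String × String)) (out : List (String × String)) : Prop := out = match_chains_by_sequence_alt original_seq_dict designed_seq_dict
instance (original_seq_dict : List (String × String)) (designed_seq_dict : List (String × String)) (out : List (String × String)) : Decidable (Spec_match_chains_by_sequence original_seq_dict designed_seq_dict out) := by unfold Spec_match_chains_by_sequence; infer_instance

-- ===== CLAIM (what is proved, stated in full; the proofs are below) =====
def Claim_equal_match_chains_by_sequence : Prop := ∀ (original_seq_dict : List (String × String)) (designed_seq_dict : List (String × String)), Dom_match_chains_by_sequence original_seq_dict designed_seq_dict → Pre_match_chains_by_sequence original_seq_dict designed_seq_dict → Spec_match_chains_by_sequence original_seq_dict designed_seq_dict (match_chains_by_sequence original_seq_dict designed_seq_dict)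

-- ===== LEMMAS AND PROOFS =====

-- the entries of `designed` still available to A's inner scan, for prefix p and used-set `used`
def pvAvail (used : PySem.Set String) (p : String) (designed : List (String × String)) : List (String × String) :=
  designed.filter (fun kv => !(PySem.Set.contains used kv.1) && (pvPrefix10 kv.2 == p))

lemma pvFindMatch_eq (used : PySem.Set String) (p : String) (l : List (String × String)) :
    pvFindMatch used p l = ((pvAvail used p l).map Prod.fst).head? := by
  induction l with
  | nil => rfl
  | cons kv rest ih =>
    obtain ⟨dk, ds⟩ := kv
    by_cases hu : dk ∈ used
    · simp [pvFindMatch, pvAvail, hu, ih]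
    · by_cases hp : pvPrefix10 ds = p
      · simp [pvFindMatch, pvAvail, hu, hp]
      · simp [pvFindMatch, pvAvail, hu, hp, ih]

lemma pvAvail_add (used : PySem.Set String) (p : String) (designed : List (String × String)) (dk : String) :
    pvAvail (PySem.Set.add used dk) p designed
      = (pvAvail used p designed).filter (fun kv => !(kv.1 == dk)) := by
  simp only [pvAvail, List.filter_filter]
  apply List.filter_congr
  intro kv _
  by_cases h1 : kv.1 ∈ used <;> by_cases h2 : kv.1 = dk <;>
    simp [PySem.Set.mem_add, h1, h2]

lemma pvLoop_eq (designed : List (String × String)) (hnd : (designed.map Prod.fst).Nodup)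
    (orig : List (String × String)) (used : PySem.Set String)
    (g : PySem.Dict String (List String)) (m : PySem.Dict String String)
    (hinv : ∀ p, g.getD p [] = (pvAvail used p designed).map Prod.fst) :
    (orig.foldl
      (fun (st : PySem.Set String × PySem.Dict String String) o =>
        match pvFindMatch st.1 (pvPrefix10 o.2) designed with
        | none => st
        | some dk => (PySem.Set.add st.1 dk, st.2.insert dk o.1))
      (used, m)).2
    = (orig.foldl
      (fun (st : PySem.Dict String (List String) × PySem.Dict String String) o =>
        match st.1.getD (pvPrefix10 o.2) [] with
        | [] => st
        | dk :: rest => (st.1.insert (pvPrefix10 o.2) rest, st.2.insert dk o.1))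
      (g, m)).2 := by
  induction orig generalizing used g m with
  | nil => rfl
  | cons o os ih =>
    simp only [List.foldl_cons]
    rw [pvFindMatch_eq, hinv (pvPrefix10 o.2)]
    cases h : pvAvail used (pvPrefix10 o.2) designed with
    | nil =>
      exact ih used g m hinv
    | cons kv tl =>
      obtain ⟨dk, ds⟩ := kv
      have hmemAv : (dk, ds) ∈ pvAvail used (pvPrefix10 o.2) designed := by
        rw [h]; exact List.mem_cons_self
      have hmem : (dk, ds) ∈ designed := List.mem_of_mem_filter hmemAv
      have hpre : pvPrefix10 ds = pvPrefix10 o.2 := by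
        have hb := List.of_mem_filter hmemAv
        simp only [Bool.and_eq_true, beq_iff_eq] at hb
        exact hb.2
      have hsub : ((pvAvail used (pvPrefix10 o.2) designed).map Prod.fst).Sublist (designed.map Prod.fst) := by
        unfold pvAvail
        exact List.Sublist.map _ List.filter_sublist
      have hndAv : ((pvAvail used (pvPrefix10 o.2) designed).map Prod.fst).Nodup := hnd.sublist hsub
      have hdk_tl : dk ∉ tl.map Prod.fst := by
        rw [h] at hndAv
        simpa using (List.nodup_cons.mp hndAv).1
      have hinv' : ∀ q, (g.insert (pvPrefix10 o.2) (List.map Prod.fst tl)).getD q []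
          = List.map Prod.fst (pvAvail (PySem.Set.add used dk) q designed) := by
        intro q
        rw [pvAvail_add]
        by_cases hq : q = pvPrefix10 o.2
        · subst hq
          rw [PySem.Dict.getD_insert, if_pos rfl, h]
          have hfil : List.filter (fun kv => !(kv.1 == dk)) ((dk, ds) :: tl) = tl := by
            rw [List.filter_cons_of_neg (by simp)]
            refine List.filter_eq_self.mpr (fun kv hkv => ?_)
            simp only [Bool.not_eq_eq_eq_not, Bool.not_true, beq_eq_false_iff_ne, ne_eq]
            intro hk
            exact hdk_tl (hk ▸ List.mem_map_of_mem hkv)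
          rw [hfil]
        · rw [PySem.Dict.getD_insert, if_neg hq, hinv q]
          have hfil : List.filter (fun kv => !(kv.1 == dk)) (pvAvail used q designed) = pvAvail used q designed := by
            refine List.filter_eq_self.mpr (fun kv hkv => ?_)
            have hkvm : kv ∈ designed := List.mem_of_mem_filter hkv
            have hkvpre : pvPrefix10 kv.2 = q := by
              have hb := List.of_mem_filter hkv
              simp only [Bool.and_eq_true, beq_iff_eq] at hb
              exact hb.2
            simp only [Bool.not_eq_eq_eq_not, Bool.not_true, beq_eq_false_iff_ne, ne_eq]
            intro hk
            have heq : kv = (dk, ds) := List.inj_on_of_nodup_map hnd hkvm hmem hk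
            exact hq (by rw [← hkvpre, heq]; exact hpre)
          rw [hfil]
      exact ih (PySem.Set.add used dk) (g.insert (pvPrefix10 o.2) (List.map Prod.fst tl))
        (m.insert dk o.1) hinv'

lemma pvInit_inv (designed : List (String × String)) (p : String) :
    (designed.foldl (fun g kv => g.modify (pvPrefix10 kv.2) [] (· ++ [kv.1])) PySem.Dict.empty).getD p []
      = (pvAvail PySem.Set.empty p designed).map Prod.fst := by
  have hfold : (designed.map (fun kv => (pvPrefix10 kv.2, kv.1))).foldl
      (fun d q => d.modify q.1 [] (· ++ [q.2])) PySem.Dict.empty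
      = designed.foldl (fun g kv => g.modify (pvPrefix10 kv.2) [] (· ++ [kv.1])) PySem.Dict.empty := by
    rw [List.foldl_map]
  rw [← hfold]
  rw [PySem.Dict.getD_foldl_modify_append]
  simp [pvAvail, List.filter_map, Function.comp_def, PySem.Set.empty]

-- ===== VERDICT (by name: the statement is the Claim_ definition above) =====
theorem match_chains_by_sequence_spec : Claim_equal_match_chains_by_sequence := by
  intro orig designed _ hpre
  unfold Spec_match_chains_by_sequence match_chains_by_sequence match_chains_by_sequence_alt
  exact congrArg PySem.Dict.items
    (pvLoop_eq designed hpre.2 orig PySem.Set.empty _ PySem.Dict.empty (pvInit_inv designed))
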